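-- pv_equiv track=rewrite | github.com/Vishnuvikas56/automateprint | backend/test.py | order_combinations
-- ===== SOURCE A (Python) =====
-- from itertools import combinations
-- from itertools import combinations
--
-- def order_combinations(order_type_supported: list, printers_data: dict):
--     result = {}
--     n = len(order_type_supported)
--     for r in range(1, n + 1):
--         for combo in combinations(order_type_supported, r):
--             key = ",".join(combo)
--             ranked_printers = []
--             for printer, supported in printers_data.items():
--                 if all(c in supported for c in combo):
--                     extras = len(supported) - len(combo)
--                     priority = (
--                         extras,
--                     )
--                     ranked_printers.append((priority, printer))
--             ranked_printers.sort(key=lambda x: x[0])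
--             result[key] = [printer for _, printer in ranked_printers]
--     return result
-- ===== SOURCE B (Python) =====
-- from itertools import combinations
--
--
-- def order_combinations(order_type_supported: list, printers_data: dict):
--     # Printer-outer scatter: enumerate each printer's supported index-combos once,
--     # append into pre-seeded buckets, then assemble in A's combo order.
--     items = list(enumerate(order_type_supported))
--     n = len(items)
--     idx_combos = [c for r in range(1, n + 1) for c in combinations(items, r)]
--     buckets = {c: [] for c in idx_combos}
--     for printer, supported in printers_data.items():
--         ok = [p for p in items if p[1] in supported]
--         for r in range(1, len(ok) + 1):
--             for c in combinations(ok, r):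
--                 buckets[c].append((len(supported) - r, printer))
--     result = {}
--     for c in idx_combos:
--         ranked = sorted(buckets[c], key=lambda e: e[0])
--         result[",".join(name for _, name in c)] = [printer for _, printer in ranked]
--     return result
-- ===== Notes on version B (the rewrite author's own statement) =====
-- stated objective: alternative
-- what changed: A scans every non-empty combination of order types and, per combination, re-tests all printers; B inverts this into a printer-outer scatter: each printer enumerates only the combinations of the types it actually supports and appends (extras, printer) into pre-seeded per-combination buckets, which are then sorted and assembled in A's key order.
import Mathlib
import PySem

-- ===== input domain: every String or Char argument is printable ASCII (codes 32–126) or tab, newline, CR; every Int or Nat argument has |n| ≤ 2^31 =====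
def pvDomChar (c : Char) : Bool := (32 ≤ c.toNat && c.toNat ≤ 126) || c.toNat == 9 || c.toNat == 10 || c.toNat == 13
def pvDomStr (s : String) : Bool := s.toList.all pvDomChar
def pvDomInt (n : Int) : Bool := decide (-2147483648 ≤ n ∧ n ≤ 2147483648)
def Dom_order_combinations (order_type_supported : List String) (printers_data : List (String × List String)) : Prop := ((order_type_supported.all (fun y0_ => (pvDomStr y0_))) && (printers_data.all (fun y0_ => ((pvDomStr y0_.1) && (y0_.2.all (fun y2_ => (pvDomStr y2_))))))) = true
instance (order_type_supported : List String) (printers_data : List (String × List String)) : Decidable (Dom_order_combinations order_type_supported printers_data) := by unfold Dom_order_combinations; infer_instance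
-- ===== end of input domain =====

-- B replaces A's combo-outer/printer-inner scan by a printer-outer scatter: each printer
-- enumerates only the index-combinations of the types it actually supports.
-- The sort key (extras,) is a 1-tuple of one int; it is ported as that Int.

-- ===== PORT A =====
def order_combinations (order_type_supported : List String) (printers_data : List (String × List String)) : List (String × List String) :=
  let n := order_type_supported.length
  ((PySem.List.pyRange 1 ((n : Int) + 1) 1).foldl (fun result r =>
    (PySem.List.combinations order_type_supported r.toNat).foldl (fun result combo =>
      let key := PySem.Str.join "," combo
      let ranked := printers_data.foldl (fun acc ps =>
        if combo.all (fun c => ps.2.contains c) then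
          acc ++ [(((ps.2.length : Int) - (combo.length : Int)), ps.1)]
        else acc) ([] : List (Int × String))
      let ranked2 := PySem.List.sorted ranked (fun x => x.1) false
      result.insert key (ranked2.map (fun x => x.2))) result)
    (PySem.Dict.empty : PySem.Dict String (List String))).items

-- ===== PORT B =====
-- buckets[c].append(…) is ported as Dict.modify with default []; the key is always
-- present (c is a combination of ok, a sublist of items, hence seeded), so Python's
-- KeyError can never fire and the default is never used.
def order_combinations_alt (order_type_supported : List String) (printers_data : List (String × List String)) : List (String × List String) :=
  let items := PySem.List.enumerate order_type_supported
  let n := items.length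
  let idxCombos := (PySem.List.pyRange 1 ((n : Int) + 1) 1).foldl
      (fun acc r => acc ++ PySem.List.combinations items r.toNat) []
  let buckets0 := idxCombos.foldl (fun d c => d.insert c ([] : List (Int × String)))
      (PySem.Dict.empty : PySem.Dict (List (Int × String)) (List (Int × String)))
  let buckets := printers_data.foldl (fun bks ps =>
    let ok := items.filter (fun p => ps.2.contains p.2)
    (PySem.List.pyRange 1 ((ok.length : Int) + 1) 1).foldl (fun bks r =>
      (PySem.List.combinations ok r.toNat).foldl (fun bks c =>
        bks.modify c [] (fun l => l ++ [(((ps.2.length : Int) - r), ps.1)])) bks) bks) buckets0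
  (idxCombos.foldl (fun result c =>
    let ranked := PySem.List.sorted (buckets.getD c []) (fun e => e.1) false
    result.insert (PySem.Str.join "," (c.map (fun p => p.2))) (ranked.map (fun x => x.2)))
    (PySem.Dict.empty : PySem.Dict String (List String))).items

-- ===== PRECONDITION & SPEC =====
def Spec_order_combinations (order_type_supported : List String) (printers_data : List (String × List String)) (out : List (String × List String)) : Prop := out = order_combinations_alt order_type_supported printers_data
instance (order_type_supported : List String) (printers_data : List (String × List String)) (out : List (String × List String)) : Decidable (Spec_order_combinations order_type_supported printers_data out) := by unfold Spec_order_combinations; infer_instance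

-- ===== CLAIM (what is proved, stated in full; the proofs are below) =====
def Claim_equal_order_combinations : Prop := ∀ (order_type_supported : List String) (printers_data : List (String × List String)), Dom_order_combinations order_type_supported printers_data → Spec_order_combinations order_type_supported printers_data (order_combinations order_type_supported printers_data)

-- ===== LEMMAS AND PROOFS =====

-- shared abbreviations for the proof
def pvItems (ots : List String) : List (Int × String) := PySem.List.enumerate ots

def pvSubsets (ok : List (Int × String)) : List (List (Int × String)) :=
  (PySem.List.pyRange 1 ((ok.length : Int) + 1) 1).flatMap (fun r => PySem.List.combinations ok r.toNat)

def pvRaw (pd : List (String × List String)) (c : List (Int × String)) : List (Int × String) :=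
  pd.foldl (fun acc ps =>
    if c.all (fun q => ps.2.contains q.2) then
      acc ++ [(((ps.2.length : Int) - (c.length : Int)), ps.1)]
    else acc) []

def pvTarget (ots : List String) (pd : List (String × List String)) : PySem.Dict String (List String) :=
  (pvSubsets (pvItems ots)).foldl (fun result c =>
    result.insert (PySem.Str.join "," (c.map (fun p => p.2)))
      ((PySem.List.sorted (pvRaw pd c) (fun e => e.1) false).map (fun x => x.2))) PySem.Dict.empty

theorem pv_A_eq (ots : List String) (pd : List (String × List String)) :
    order_combinations ots pd = (pvTarget ots pd).items := by
  have hL : (PySem.List.pyRange 1 ((ots.length : Int) + 1) 1).flatMap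
        (fun r => PySem.List.combinations ots r.toNat)
      = (pvSubsets (pvItems ots)).map (List.map (fun p => p.2)) := by
    unfold pvSubsets pvItems
    rw [List.map_flatMap, PySem.List.length_enumerate]
    apply List.flatMap_congr
    intro r _
    rw [← PySem.List.combinations_map, PySem.List.map_snd_enumerate]
  unfold order_combinations pvTarget
  dsimp only
  rw [← List.foldl_flatMap, hL, List.foldl_map]
  congr 1
  apply PySem.List.foldl_congr_mem
  intro acc c _
  simp only [pvRaw, List.all_map, List.length_map, Function.comp_def]

-- items is Nodup (first components strictly increasing)
theorem pv_items_nodup (ots : List String) : (pvItems ots).Nodup := by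
  have h := PySem.List.pairwise_lt_enumerate ots 0
  exact h.imp (fun {a b} hlt => by intro he; subst he; exact lt_irrefl _ hlt)

theorem pv_nodup_combinations {α : Type} [DecidableEq α] (l : List α) (r : Nat) (h : l.Nodup) :
    (PySem.List.combinations l r).Nodup := by
  induction l generalizing r with
  | nil => cases r <;> simp [PySem.List.combinations_zero, PySem.List.combinations_nil_succ]
  | cons x xs ih =>
    cases r with
    | zero => simp [PySem.List.combinations_zero]
    | succ r =>
      rw [PySem.List.combinations_cons_succ, List.nodup_append]
      have hx : x ∉ xs := (List.nodup_cons.mp h).1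
      have hxs : xs.Nodup := (List.nodup_cons.mp h).2
      refine ⟨(ih r hxs).map (fun a b hab => by simpa using hab), ih (r+1) hxs, ?_⟩
      intro a ha b hb he
      obtain ⟨t, ht, rfl⟩ := List.mem_map.mp ha
      subst he
      have hsub := (PySem.List.mem_combinations_iff xs (r+1) (x :: t)).mp hb
      exact hx (hsub.1.subset (List.mem_cons_self))

theorem pv_filter_beq_of_nodup {α : Type} [DecidableEq α] [BEq α] [LawfulBEq α]
    (l : List α) (c : α) (h : l.Nodup) :
    l.filter (fun x => x == c) = if c ∈ l then [c] else [] := by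
  induction l with
  | nil => simp
  | cons a l ih =>
    rw [List.nodup_cons] at h
    by_cases hac : a = c
    · subst hac
      simp [h.1, ih h.2]
    · simp [hac, ih h.2, Ne.symm hac]

theorem pv_flatMap_single {α β : Type} [DecidableEq α] (l : List α) (a : α) (v : List β)
    (hnd : l.Nodup) :
    l.flatMap (fun r => if r = a then v else []) = if a ∈ l then v else [] := by
  induction l with
  | nil => simp
  | cons x l ih =>
    rw [List.nodup_cons] at hnd
    by_cases hxa : x = a
    · subst hxa
      have : l.flatMap (fun r => if r = x then v else []) = [] := by
        apply List.flatMap_eq_nil_iff.mpr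
        intro r hr
        simp [show r ≠ x from fun he => hnd.1 (he ▸ hr)]
      simp [this]
    · simp [hxa, ih hnd.2, Ne.symm hxa]

theorem pv_sublist_filter_iff {α : Type} (c l : List α) (p : α → Bool) (hs : c.Sublist l) :
    c.Sublist (l.filter p) ↔ c.all p = true := by
  constructor
  · intro h
    rw [List.all_eq_true]
    intro x hx
    exact (List.mem_filter.mp (h.subset hx)).2
  · intro h
    have : c.filter p = c := List.filter_eq_self.mpr (List.all_eq_true.mp h)
    exact this ▸ hs.filter p

theorem pv_mem_subsets {ok c : List (Int × String)} :
    c ∈ pvSubsets ok ↔ c.Sublist ok ∧ c ≠ [] := by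
  unfold pvSubsets
  rw [List.mem_flatMap]
  constructor
  · rintro ⟨r, hr, hc⟩
    rw [PySem.List.mem_pyRange_one] at hr
    have hm := (PySem.List.mem_combinations_iff _ _ _).mp hc
    refine ⟨hm.1, ?_⟩
    intro he
    subst he
    simp at hm
    omega
  · rintro ⟨hs, hne⟩
    refine ⟨(c.length : Int), ?_, ?_⟩
    · rw [PySem.List.mem_pyRange_one]
      have h1 : 0 < c.length := List.length_pos_of_ne_nil hne
      have h2 : c.length ≤ ok.length := hs.length_le
      omega
    · rw [PySem.List.mem_combinations_iff]
      exact ⟨hs, by simp⟩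

theorem pv_filter_subsets (ok : List (Int × String)) (c : List (Int × String)) (hnd : ok.Nodup) :
    (pvSubsets ok).filter (fun x => x == c) = if c.Sublist ok ∧ c ≠ [] then [c] else [] := by
  unfold pvSubsets
  rw [List.filter_flatMap]
  have heach : ∀ r ∈ PySem.List.pyRange 1 ((ok.length : Int) + 1) 1,
      (PySem.List.combinations ok r.toNat).filter (fun x => x == c)
        = if (r = (c.length : Int) ∧ c.Sublist ok) then [c] else [] := by
    intro r hr
    rw [PySem.List.mem_pyRange_one] at hr
    rw [pv_filter_beq_of_nodup _ _ (pv_nodup_combinations ok r.toNat hnd)]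
    by_cases h1 : c.Sublist ok
    · by_cases h2 : r = (c.length : Int)
      · subst h2
        have : c ∈ PySem.List.combinations ok (c.length : Int).toNat := by
          rw [PySem.List.mem_combinations_iff]
          exact ⟨h1, by simp⟩
        simp only [Int.toNat_natCast] at this
        simp [this, h1]
      · have hnm : c ∉ PySem.List.combinations ok r.toNat := by
          intro hm
          have := (PySem.List.mem_combinations_iff _ _ _).mp hm
          omega
        simp [hnm, h2]
    · have hnm : c ∉ PySem.List.combinations ok r.toNat := by
        intro hm
        exact h1 ((PySem.List.mem_combinations_iff _ _ _).mp hm).1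
      simp [hnm, h1]
  rw [List.flatMap_congr heach]
  by_cases h1 : c.Sublist ok
  · have hcong : ∀ r ∈ PySem.List.pyRange 1 ((ok.length : Int) + 1) 1,
        (if (r = (c.length : Int) ∧ c.Sublist ok) then [c] else [])
          = if r = (c.length : Int) then [c] else [] := by
      intro r _
      simp [h1]
    rw [List.flatMap_congr hcong,
        pv_flatMap_single _ _ _ (PySem.List.nodup_pyRange_one 1 ((ok.length : Int) + 1))]
    simp only [PySem.List.mem_pyRange_one]
    by_cases hne : c = []
    · subst hne
      simp
    · have hp : 0 < c.length := List.length_pos_of_ne_nil hne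
      have h2 : c.length ≤ ok.length := h1.length_le
      have : (1 : Int) ≤ (c.length : Int) ∧ (c.length : Int) < (ok.length : Int) + 1 := by omega
      simp [this, h1, hne]
  · have hcong : ∀ r ∈ PySem.List.pyRange 1 ((ok.length : Int) + 1) 1,
        (if (r = (c.length : Int) ∧ c.Sublist ok) then [c] else []) = ([] : List (List (Int × String))) := by
      intro r _
      simp [h1]
    rw [List.flatMap_congr hcong]
    simp [h1]

theorem pv_getD_empty (c : List (Int × String)) :
    (PySem.Dict.empty : PySem.Dict (List (Int × String)) (List (Int × String))).getD c [] = [] := by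
  simp [PySem.Dict.empty, PySem.Dict.getD, PySem.Dict.get?]

theorem pv_seed_getD (l : List (List (Int × String)))
    (d : PySem.Dict (List (Int × String)) (List (Int × String))) (c : List (Int × String))
    (h : d.getD c [] = []) :
    (l.foldl (fun d c' => d.insert c' ([] : List (Int × String))) d).getD c [] = [] := by
  induction l generalizing d with
  | nil => exact h
  | cons a l ih =>
    simp only [List.foldl_cons]
    apply ih
    by_cases hac : c = a
    · subst hac
      rw [PySem.Dict.getD_insert_self]
    · rw [PySem.Dict.getD_insert_of_ne _ _ _ hac]
      exact h

theorem pv_flatMap_ite {α β : Type} (l : List α) (p : α → Bool) (f : α → β) :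
    l.flatMap (fun x => if p x then [f x] else []) = (l.filter p).map f := by
  induction l with
  | nil => simp
  | cons a l ih =>
    by_cases hp : p a <;> simp [hp, ih]

theorem pv_inner (w : Int) (pr : String) (ok : List (Int × String))
    (bks : PySem.Dict (List (Int × String)) (List (Int × String))) :
    (PySem.List.pyRange 1 ((ok.length : Int) + 1) 1).foldl (fun bks r =>
        (PySem.List.combinations ok r.toNat).foldl (fun bks c =>
          bks.modify c [] (fun l => l ++ [(w - r, pr)])) bks) bks
      = ((pvSubsets ok).map (fun c => (c, (w - (c.length : Int), pr)))).foldl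
          (fun d q => d.modify q.1 [] (fun l => l ++ [q.2])) bks := by
  rw [List.foldl_map]
  unfold pvSubsets
  rw [List.foldl_flatMap]
  apply PySem.List.foldl_congr_mem
  intro acc r hr
  apply PySem.List.foldl_congr_mem
  intro acc2 c hc
  rw [PySem.List.mem_pyRange_one] at hr
  have h1 := (PySem.List.mem_combinations_iff _ _ _).mp hc
  have hlen : (c.length : Int) = r := by omega
  rw [hlen]

theorem pv_bucket (ots : List String) (pd : List (String × List String))
    (c : List (Int × String)) (hc : c ∈ pvSubsets (pvItems ots)) :
    ((pd.foldl (fun bks ps =>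
        (PySem.List.pyRange 1 ((((PySem.List.enumerate ots).filter (fun p => ps.2.contains p.2)).length : Int) + 1) 1).foldl (fun bks r =>
          (PySem.List.combinations ((PySem.List.enumerate ots).filter (fun p => ps.2.contains p.2)) r.toNat).foldl (fun bks c =>
            bks.modify c [] (fun l => l ++ [(((ps.2.length : Int) - r), ps.1)])) bks) bks)
      (((PySem.List.pyRange 1 ((ots.length : Int) + 1) 1).flatMap
          (fun r => PySem.List.combinations (PySem.List.enumerate ots) r.toNat)).foldl
        (fun d c => d.insert c ([] : List (Int × String))) PySem.Dict.empty)).getD c [])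
    = pvRaw pd c := by
  obtain ⟨hcs0, hcne⟩ := pv_mem_subsets.mp hc
  have hcs : c.Sublist (PySem.List.enumerate ots) := hcs0
  have hni : (PySem.List.enumerate ots).Nodup := pv_items_nodup ots
  have hstep : (fun (bks : PySem.Dict (List (Int × String)) (List (Int × String))) (ps : String × List String) =>
        (PySem.List.pyRange 1 ((((PySem.List.enumerate ots).filter (fun p => ps.2.contains p.2)).length : Int) + 1) 1).foldl (fun bks r =>
          (PySem.List.combinations ((PySem.List.enumerate ots).filter (fun p => ps.2.contains p.2)) r.toNat).foldl (fun bks c =>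
            bks.modify c [] (fun l => l ++ [(((ps.2.length : Int) - r), ps.1)])) bks) bks)
      = (fun bks ps =>
        ((pvSubsets ((PySem.List.enumerate ots).filter (fun p => ps.2.contains p.2))).map
            (fun c => (c, ((ps.2.length : Int) - (c.length : Int), ps.1)))).foldl
          (fun d q => d.modify q.1 [] (fun l => l ++ [q.2])) bks) := by
    funext bks ps
    exact pv_inner ((ps.2.length : Int)) ps.1 _ bks
  rw [hstep]
  rw [show (fun (bks : PySem.Dict (List (Int × String)) (List (Int × String))) (ps : String × List String) =>
        ((pvSubsets ((PySem.List.enumerate ots).filter (fun p => ps.2.contains p.2))).map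
            (fun c => (c, ((ps.2.length : Int) - (c.length : Int), ps.1)))).foldl
          (fun d q => d.modify q.1 [] (fun l => l ++ [q.2])) bks)
      = (fun bks ps => List.foldl (fun d (q : List (Int × String) × (Int × String)) => d.modify q.1 [] (fun l => l ++ [q.2])) bks
          ((pvSubsets ((PySem.List.enumerate ots).filter (fun p => ps.2.contains p.2))).map
            (fun c => (c, ((ps.2.length : Int) - (c.length : Int), ps.1))))) from rfl]
  rw [← List.foldl_flatMap]
  rw [PySem.Dict.getD_foldl_modify_append]
  rw [pv_seed_getD _ _ _ (pv_getD_empty c), List.nil_append]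
  rw [List.filter_flatMap]
  have hper : ∀ ps ∈ pd,
      ((pvSubsets ((PySem.List.enumerate ots).filter (fun p => ps.2.contains p.2))).map
          (fun c => (c, ((ps.2.length : Int) - (c.length : Int), ps.1)))).filter (fun q => q.1 == c)
        = if c.all (fun q => ps.2.contains q.2) then
            [(c, ((ps.2.length : Int) - (c.length : Int), ps.1))] else [] := by
    intro ps _
    rw [List.filter_map]
    rw [show ((fun (q : List (Int × String) × (Int × String)) => q.1 == c) ∘
        (fun c => (c, ((ps.2.length : Int) - (c.length : Int), ps.1)))) = (fun x => x == c) from rfl]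
    rw [pv_filter_subsets _ _ (hni.filter _)]
    by_cases hall : (c.all fun q => ps.2.contains q.2) = true
    · have hsf : c.Sublist ((PySem.List.enumerate ots).filter (fun q => ps.2.contains q.2)) :=
        (pv_sublist_filter_iff c (PySem.List.enumerate ots) _ hcs).mpr hall
      rw [if_pos ⟨hsf, hcne⟩, if_pos hall]
      rfl
    · have hsf : ¬ c.Sublist ((PySem.List.enumerate ots).filter (fun q => ps.2.contains q.2)) := by
        intro hs
        exact hall ((pv_sublist_filter_iff c (PySem.List.enumerate ots) _ hcs).mp hs)
      rw [if_neg (fun h => hsf h.1), if_neg hall]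
      rfl
  rw [List.flatMap_congr hper, List.map_flatMap]
  have hper2 : ∀ ps ∈ pd,
      ((if c.all (fun q => ps.2.contains q.2) then
          [(c, ((ps.2.length : Int) - (c.length : Int), ps.1))] else []).map (fun x => x.2))
        = if c.all (fun q => ps.2.contains q.2) then
            [(((ps.2.length : Int) - (c.length : Int)), ps.1)] else [] := by
    intro ps _
    by_cases hall : (c.all fun q => ps.2.contains q.2) = true
    · rw [if_pos hall, if_pos hall]
      rfl
    · rw [if_neg hall, if_neg hall]
      rfl
  rw [List.flatMap_congr hper2, pv_flatMap_ite]
  unfold pvRaw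
  rw [PySem.List.foldl_append_if (fun ps : String × List String => c.all (fun q => ps.2.contains q.2))
      (fun ps : String × List String => (((ps.2.length : Int) - (c.length : Int)), ps.1)),
    List.nil_append]

theorem pv_B_eq (ots : List String) (pd : List (String × List String)) :
    order_combinations_alt ots pd = (pvTarget ots pd).items := by
  have hsub : pvSubsets (pvItems ots)
      = (PySem.List.pyRange 1 ((ots.length : Int) + 1) 1).flatMap
          (fun r => PySem.List.combinations (PySem.List.enumerate ots) r.toNat) := by
    unfold pvSubsets pvItems
    rw [PySem.List.length_enumerate]
  unfold order_combinations_alt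
  dsimp only
  rw [PySem.List.foldl_append_eq_flatMap, List.nil_append, PySem.List.length_enumerate]
  unfold pvTarget
  rw [hsub]
  congr 1
  apply PySem.List.foldl_congr_mem
  intro acc c hc
  have hc' : c ∈ pvSubsets (pvItems ots) := by rw [hsub]; exact hc
  rw [pv_bucket ots pd c hc']

-- ===== VERDICT (by name: the statement is the Claim_ definition above) =====
theorem order_combinations_spec : Claim_equal_order_combinations := by
  intro ots pd _
  unfold Spec_order_combinations
  rw [pv_A_eq, pv_B_eq]
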